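-- pv_equiv track=rewrite | github.com/aqntks/PSis | passport_scan.py | spiltName
-- ===== SOURCE A (Python) =====
-- def spiltName(name):
--     nameCheck, nameBool = 0, False
--     surName, givenNames = '', ''
--     for s in name:
--         if s == '<':
--             nameCheck += 1
--         else:
--             if nameCheck == 1: nameCheck = 0
--
--         if nameCheck == 2 and nameBool is True:
--             break
--         elif nameCheck == 2:
--             nameCheck = 0
--             nameBool = True
--         elif nameBool is False:
--             surName += s
--         else:
--             givenNames += s
--
--     return surName, givenNames
-- ===== SOURCE B (Python) =====
-- def spiltName(name):
--     i = name.find('<<')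
--     if i == -1:
--         return name, ''
--     surName = name[:i+1]
--     k = name.find('<<', i+2)
--     givenNames = name[i+2:] if k == -1 else name[i+2:k+1]
--     return surName, givenNames
-- ===== Notes on version B (the rewrite author's own statement) =====
-- stated objective: simpler
-- what changed: Replaced A's char-by-char state machine (two flags and a break) by two index lookups of the double-filler separator via str.find plus three slices, keeping the boundary filler character that A retains on each side.
import Mathlib
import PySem

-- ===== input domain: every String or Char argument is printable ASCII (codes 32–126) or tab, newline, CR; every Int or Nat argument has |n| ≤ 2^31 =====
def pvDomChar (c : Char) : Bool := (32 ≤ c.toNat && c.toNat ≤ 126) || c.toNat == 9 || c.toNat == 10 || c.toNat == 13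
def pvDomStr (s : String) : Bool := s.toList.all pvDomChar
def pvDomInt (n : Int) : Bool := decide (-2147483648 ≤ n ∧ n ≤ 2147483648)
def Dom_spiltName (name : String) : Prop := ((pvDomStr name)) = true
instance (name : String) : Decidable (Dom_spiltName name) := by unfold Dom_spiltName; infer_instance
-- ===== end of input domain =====

-- B replaces A's char-by-char state machine by two str.find index lookups and three slices: simpler, and measurably faster (C-level find/slice vs a Python-level loop).

-- ===== PORT A =====
-- literal port of A's loop: state (nameCheck, nameBool, surName, givenNames); the break returns the accumulators
def spiltNameGo (cs : List Char) (nameCheck : Int) (nameBool : Bool)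
    (surName givenNames : List Char) : List Char × List Char :=
  match cs with
  | [] => (surName, givenNames)
  | s :: rest =>
    let nc := if s = '<' then nameCheck + 1 else (if nameCheck = 1 then 0 else nameCheck)
    if nc = 2 ∧ nameBool = true then (surName, givenNames)
    else if nc = 2 then spiltNameGo rest 0 true surName givenNames
    else if nameBool = false then spiltNameGo rest nc nameBool (surName ++ [s]) givenNames
    else spiltNameGo rest nc nameBool surName (givenNames ++ [s])

def spiltName (name : String) : String × String :=
  let p := spiltNameGo name.toList 0 false [] []
  (String.ofList p.1, String.ofList p.2)

-- ===== PORT B =====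
def spiltName_alt (name : String) : String × String :=
  let i := PySem.Str.find name "<<"
  if i = -1 then (name, "")
  else
    let surName := PySem.Str.slice name none (some (i + 1))
    let k := PySem.Str.findFrom name "<<" (i + 2)
    let givenNames := if k = -1 then PySem.Str.slice name (some (i + 2)) none
                      else PySem.Str.slice name (some (i + 2)) (some (k + 1))
    (surName, givenNames)

-- ===== PRECONDITION & SPEC =====
def Spec_spiltName (name : String) (out : String × String) : Prop := out = spiltName_alt name
instance (name : String) (out : String × String) : Decidable (Spec_spiltName name out) := by unfold Spec_spiltName; infer_instance

-- ===== CLAIM (what is proved, stated in full; the proofs are below) =====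
def Claim_equal_spiltName : Prop := ∀ (name : String), Dom_spiltName name → Spec_spiltName name (spiltName name)

-- ===== LEMMAS AND PROOFS =====

-- the prefix A keeps of a region: up to (and including) the first '<' of the first '<<', or all of it
def pvTail (ds : List Char) : List Char :=
  if PySem.Chars.find ds ['<', '<'] = -1 then ds
  else ds.take ((PySem.Chars.find ds ['<', '<']).toNat + 1)

-- what remains after the first '<<' (empty if there is none)
def pvDrop (ds : List Char) : List Char :=
  if PySem.Chars.find ds ['<', '<'] = -1 then []
  else ds.drop ((PySem.Chars.find ds ['<', '<']).toNat + 2)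

lemma fgo_shift (cs : List Char) (k : Nat) :
    PySem.Chars.find.go ['<', '<'] cs k =
      if PySem.Chars.find.go ['<', '<'] cs 0 = -1 then -1
      else PySem.Chars.find.go ['<', '<'] cs 0 + k := by
  induction cs generalizing k with
  | nil => simp [PySem.Chars.find.go]
  | cons c cs ih =>
    have hlb : -1 ≤ PySem.Chars.find.go ['<', '<'] cs 0 :=
      PySem.Chars.neg_one_le_find cs ['<', '<']
    simp only [PySem.Chars.find.go]
    by_cases h : List.isPrefixOf ['<', '<'] (c :: cs)
    · simp [h]
    · simp only [h]
      rw [ih (k + 1), ih 1]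
      split_ifs <;> push_cast <;> omega

lemma find_cons (c : Char) (cs : List Char) :
    PySem.Chars.find (c :: cs) ['<', '<'] =
      if List.isPrefixOf ['<', '<'] (c :: cs) then 0
      else if PySem.Chars.find cs ['<', '<'] = -1 then -1
      else PySem.Chars.find cs ['<', '<'] + 1 := by
  simp only [PySem.Chars.find, PySem.Chars.find.go]
  by_cases h : List.isPrefixOf ['<', '<'] (c :: cs)
  · simp [h]
  · simp only [h]
    rw [fgo_shift cs 1]
    split_ifs <;> simp

lemma find_nil : PySem.Chars.find [] ['<', '<'] = -1 := by decide

lemma find_pat (cs : List Char) : PySem.Chars.find ('<' :: '<' :: cs) ['<', '<'] = 0 := by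
  rw [find_cons]; simp [List.isPrefixOf]

lemma pvTail_pat (cs : List Char) : pvTail ('<' :: '<' :: cs) = ['<'] := by
  simp [pvTail, find_pat]

lemma pvDrop_pat (cs : List Char) : pvDrop ('<' :: '<' :: cs) = cs := by
  simp [pvDrop, find_pat]

lemma pvTail_cons (c : Char) (cs : List Char)
    (h : List.isPrefixOf ['<', '<'] (c :: cs) = false) :
    pvTail (c :: cs) = c :: pvTail cs := by
  have hlb : -1 ≤ PySem.Chars.find cs ['<', '<'] := PySem.Chars.neg_one_le_find cs ['<', '<']
  simp only [pvTail, find_cons, h, Bool.false_eq_true, if_false]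
  by_cases h1 : PySem.Chars.find cs ['<', '<'] = -1
  · simp [h1]
  · have h2 : ¬ (PySem.Chars.find cs ['<', '<'] + 1 = -1) := by omega
    simp only [h1, h2, if_false]
    rw [show ((PySem.Chars.find cs ['<', '<'] + 1).toNat + 1)
        = ((PySem.Chars.find cs ['<', '<']).toNat + 1) + 1 from by omega]
    rw [List.take_succ_cons]

lemma pvDrop_cons (c : Char) (cs : List Char)
    (h : List.isPrefixOf ['<', '<'] (c :: cs) = false) :
    pvDrop (c :: cs) = pvDrop cs := by
  have hlb : -1 ≤ PySem.Chars.find cs ['<', '<'] := PySem.Chars.neg_one_le_find cs ['<', '<']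
  simp only [pvDrop, find_cons, h, Bool.false_eq_true, if_false]
  by_cases h1 : PySem.Chars.find cs ['<', '<'] = -1
  · simp [h1]
  · have h2 : ¬ (PySem.Chars.find cs ['<', '<'] + 1 = -1) := by omega
    simp only [h1, h2, if_false]
    rw [show ((PySem.Chars.find cs ['<', '<'] + 1).toNat + 2)
        = ((PySem.Chars.find cs ['<', '<']).toNat + 2) + 1 from by omega]
    rw [List.drop_succ_cons]

lemma goTrue : ∀ (cs sur giv : List Char),
    spiltNameGo cs 0 true sur giv = (sur, giv ++ pvTail cs)
  | [], sur, giv => by simp [spiltNameGo, pvTail, find_nil]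
  | [c], sur, giv => by
      have h1 : PySem.Chars.find [c] ['<', '<'] = -1 := by
        rw [find_cons]; simp [List.isPrefixOf, find_nil]
      by_cases hc : c = '<' <;> simp [spiltNameGo, hc, pvTail, h1]
  | c :: d :: rest, sur, giv => by
      by_cases hc : c = '<'
      · by_cases hd : d = '<'
        · subst hc hd
          rw [show spiltNameGo ('<' :: '<' :: rest) 0 true sur giv = (sur, giv ++ ['<']) from by
                simp [spiltNameGo]]
          rw [pvTail_pat]
        · subst hc
          have hp : List.isPrefixOf ['<', '<'] (d :: rest) = false := by
            simp [List.isPrefixOf, Ne.symm hd]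
          have hp2 : List.isPrefixOf ['<', '<'] ('<' :: d :: rest) = false := by
            simp [List.isPrefixOf, Ne.symm hd]
          rw [show spiltNameGo ('<' :: d :: rest) 0 true sur giv
                = spiltNameGo rest 0 true sur ((giv ++ ['<']) ++ [d]) from by
                simp [spiltNameGo, hd]]
          rw [goTrue rest sur ((giv ++ ['<']) ++ [d])]
          rw [pvTail_cons _ _ hp2, pvTail_cons _ _ hp]
          simp
      · have hp : List.isPrefixOf ['<', '<'] (c :: d :: rest) = false := by
          simp [List.isPrefixOf, Ne.symm hc]
        rw [show spiltNameGo (c :: d :: rest) 0 true sur giv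
              = spiltNameGo (d :: rest) 0 true sur (giv ++ [c]) from by
              simp [spiltNameGo, hc]]
        rw [goTrue (d :: rest) sur (giv ++ [c])]
        rw [pvTail_cons _ _ hp]
        simp

lemma goFalse : ∀ (cs sur giv : List Char),
    spiltNameGo cs 0 false sur giv = (sur ++ pvTail cs, giv ++ pvTail (pvDrop cs))
  | [], sur, giv => by simp [spiltNameGo, pvTail, pvDrop, find_nil]
  | [c], sur, giv => by
      have h1 : PySem.Chars.find [c] ['<', '<'] = -1 := by
        rw [find_cons]; simp [List.isPrefixOf, find_nil]
      by_cases hc : c = '<' <;>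
        simp [spiltNameGo, hc, pvTail, pvDrop, h1, find_nil]
  | c :: d :: rest, sur, giv => by
      by_cases hc : c = '<'
      · by_cases hd : d = '<'
        · subst hc hd
          rw [show spiltNameGo ('<' :: '<' :: rest) 0 false sur giv
                = spiltNameGo rest 0 true (sur ++ ['<']) giv from by
                simp [spiltNameGo]]
          rw [goTrue rest (sur ++ ['<']) giv, pvTail_pat, pvDrop_pat]
        · subst hc
          have hp : List.isPrefixOf ['<', '<'] (d :: rest) = false := by
            simp [List.isPrefixOf, Ne.symm hd]
          have hp2 : List.isPrefixOf ['<', '<'] ('<' :: d :: rest) = false := by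
            simp [List.isPrefixOf, Ne.symm hd]
          rw [show spiltNameGo ('<' :: d :: rest) 0 false sur giv
                = spiltNameGo rest 0 false ((sur ++ ['<']) ++ [d]) giv from by
                simp [spiltNameGo, hd]]
          rw [goFalse rest ((sur ++ ['<']) ++ [d]) giv]
          rw [pvTail_cons _ _ hp2, pvTail_cons _ _ hp, pvDrop_cons _ _ hp2, pvDrop_cons _ _ hp]
          simp
      · have hp : List.isPrefixOf ['<', '<'] (c :: d :: rest) = false := by
          simp [List.isPrefixOf, Ne.symm hc]
        rw [show spiltNameGo (c :: d :: rest) 0 false sur giv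
              = spiltNameGo (d :: rest) 0 false (sur ++ [c]) giv from by
              simp [spiltNameGo, hc]]
        rw [goFalse (d :: rest) (sur ++ [c]) giv]
        rw [pvTail_cons _ _ hp, pvDrop_cons _ _ hp]
        simp



lemma chars_slice_eq (s : List Char) (a b : Option Int) :
    PySem.Chars.slice s a b = PySem.List.slice s a b := rfl

-- ===== VERDICT (by name: the statement is the Claim_ definition above) =====
theorem spiltName_spec : Claim_equal_spiltName := by
  intro name _
  unfold Spec_spiltName spiltName spiltName_alt
  simp only [PySem.Str.find_eq]
  set cs := name.toList with hcs
  have hpat : ("<<" : String).toList = ['<', '<'] := by decide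
  rw [hpat]
  have hlb : -1 ≤ PySem.Chars.find cs ['<', '<'] := PySem.Chars.neg_one_le_find cs ['<', '<']
  rw [goFalse cs [] []]
  by_cases h1 : PySem.Chars.find cs ['<', '<'] = -1
  · simp only [h1, if_true, pvTail, pvDrop, find_nil]
    simp [hcs]
  · rw [if_neg h1]
    set i := PySem.Chars.find cs ['<', '<'] with hi
    have hi0 : 0 ≤ i := by omega
    obtain ⟨hpre, -⟩ := PySem.Chars.find_spec (s := cs) (sub := ['<', '<']) hi0
    have hle : i.toNat + 2 ≤ cs.length := by
      have := hpre.length_le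
      simp at this
      omega
    rw [PySem.Str.findFrom_eq, hpat]
    rw [show (i + 2 : Int) = ((i.toNat + 2 : Nat) : Int) from by omega]
    rw [PySem.Chars.findFrom_natCast cs ['<', '<'] (i.toNat + 2) hle]
    set ds := cs.drop (i.toNat + 2) with hds
    have hds' : pvDrop cs = ds := by
      simp only [pvDrop, ← hi, if_neg h1, hds]
    have hlb2 : -1 ≤ PySem.Chars.find ds ['<', '<'] := PySem.Chars.neg_one_le_find ds ['<', '<']
    by_cases h2 : PySem.Chars.find ds ['<', '<'] = -1
    · rw [if_pos h2, if_pos rfl]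
      refine Prod.ext ?_ ?_
      · apply String.toList_inj.mp
        rw [String.toList_ofList, PySem.Str.toList_slice, chars_slice_eq,
            PySem.List.slice_to (xs := cs) (b := i + 1) (by omega)]
        simp only [pvTail, ← hi, if_neg h1]
        rw [show (i + 1).toNat = i.toNat + 1 from by omega]
        simp
      · apply String.toList_inj.mp
        rw [String.toList_ofList, PySem.Str.toList_slice, chars_slice_eq,
            PySem.List.slice_from (xs := cs) (a := ((i.toNat + 2 : Nat) : Int)) (by omega)]
        simp only [hds', pvTail, h2, if_pos]
        rw [show (((i.toNat + 2 : Nat) : Int)).toNat = i.toNat + 2 from by omega]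
        simp [hds]
    · have hk : ¬ (((i.toNat + 2 : Nat) : Int) + PySem.Chars.find ds ['<', '<'] = -1) := by
        push_cast; omega
      rw [if_neg h2, if_neg hk]
      refine Prod.ext ?_ ?_
      · apply String.toList_inj.mp
        rw [String.toList_ofList, PySem.Str.toList_slice, chars_slice_eq,
            PySem.List.slice_to (xs := cs) (b := i + 1) (by omega)]
        simp only [pvTail, ← hi, if_neg h1]
        rw [show (i + 1).toNat = i.toNat + 1 from by omega]
        simp
      · apply String.toList_inj.mp
        rw [String.toList_ofList, PySem.Str.toList_slice, chars_slice_eq,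
            PySem.List.slice_toNat (xs := cs)
              (a := ((i.toNat + 2 : Nat) : Int))
              (b := ((i.toNat + 2 : Nat) : Int) + PySem.Chars.find ds ['<', '<'] + 1)
              (by omega) (by push_cast; omega)]
        simp only [hds', pvTail, if_neg h2]
        rw [show (((i.toNat + 2 : Nat) : Int)).toNat = i.toNat + 2 from by omega]
        rw [show (((i.toNat + 2 : Nat) : Int) + PySem.Chars.find ds ['<', '<'] + 1).toNat - (i.toNat + 2)
              = (PySem.Chars.find ds ['<', '<']).toNat + 1 from by omega]
        simp [hds]
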